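-- pv_equiv track=rewrite | github.com/chutney3365/My_Projects | Python/small_puzzles/puzzle.py | generate_guesses
-- ===== SOURCE A (Python) =====
-- from collections import defaultdict
--
-- def generate_guesses(l=2, u=800):
--     sums = defaultdict(list)
--     prods = defaultdict(list)
--     for p in range(l, u + 1):
--         for q in range(p, u + 1):
--             sums[p + q].append((p, q))
--             prods[p * q].append((p, q))
--
--     # Cannot be product of two primes, otherwise Polly would know
--     def polly_does_not_know(n):
--         return len(prods[n]) > 1
--
--     # Cannot sum to something expressible by the sum of two primes
--     #   By Goldbach's conjecture, this means that it at least is odd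
--     # Also Sam knows that Polly cannot know
--     def sam_does_not_know(n):
--         return (
--             n % 2 == 1
--             and len(sums[n]) > 1
--             and all(polly_does_not_know(x * y) for (x, y) in sums[n])
--         )
--
--     # If Polly now knows, then there can only be one number such that
--     # for all possible factorizations x * y of n, Sam does not know
--     def now_polly_knows(n):
--         count = 0
--         for (x, y) in prods[n]:
--             if sam_does_not_know(x + y):
--                 count += 1
--             if count > 1:
--                 return False
--
--         return count == 1
--
--     # If Sam now knows, then for all x, y such that x + y = n
--     # there should be only one such x * y where Polly knows
--     def now_sam_knows(n):
--         count = 0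
--         for (x, y) in sums[n]:
--             if now_polly_knows(x * y):
--                 count += 1
--             if count > 1:
--                 return False
--
--         return count == 1
--
--     guesses = [
--         (p, q)
--         for p in (range(l, u + 1)) for q in range(p, u + 1)
--         if (
--             polly_does_not_know(p * q)
--             and sam_does_not_know(p + q)
--             and now_polly_knows(p * q)
--             and now_sam_knows(p + q)
--         )
--     ]
--     return guesses
-- ===== SOURCE B (Python) =====
-- def generate_guesses(l=2, u=800):
--     sums = {}
--     prods = {}
--     for p in range(l, u + 1):
--         for q in range(p, u + 1):
--             sums.setdefault(p + q, []).append((p, q))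
--             prods.setdefault(p * q, []).append((p, q))
--     # memoise each knowledge predicate once per distinct key
--     pdk = {n: len(v) > 1 for n, v in prods.items()}
--     sdk = {n: n % 2 == 1 and len(v) > 1 and all(pdk.get(x * y, False) for x, y in v)
--            for n, v in sums.items()}
--     npk = {n: sum(sdk.get(x + y, False) for x, y in v) == 1 for n, v in prods.items()}
--     nsk = {n: sum(npk.get(x * y, False) for x, y in v) == 1 for n, v in sums.items()}
--     return [(p, q)
--             for p in range(l, u + 1) for q in range(p, u + 1)
--             if pdk.get(p * q, False) and sdk.get(p + q, False)
--             and npk.get(p * q, False) and nsk.get(p + q, False)]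
-- ===== Notes on version B (the rewrite author's own statement) =====
-- stated objective: alternative
-- what changed: B precomputes each of the four knowledge predicates once per distinct sum/product key as dict-comprehension memo tables (and replaces the early-exit counting loops by a plain count), instead of A's re-evaluating the nested predicate recursion (now_sam -> now_polly -> sam -> polly) from scratch for every pair (p, q).
import Mathlib
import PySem

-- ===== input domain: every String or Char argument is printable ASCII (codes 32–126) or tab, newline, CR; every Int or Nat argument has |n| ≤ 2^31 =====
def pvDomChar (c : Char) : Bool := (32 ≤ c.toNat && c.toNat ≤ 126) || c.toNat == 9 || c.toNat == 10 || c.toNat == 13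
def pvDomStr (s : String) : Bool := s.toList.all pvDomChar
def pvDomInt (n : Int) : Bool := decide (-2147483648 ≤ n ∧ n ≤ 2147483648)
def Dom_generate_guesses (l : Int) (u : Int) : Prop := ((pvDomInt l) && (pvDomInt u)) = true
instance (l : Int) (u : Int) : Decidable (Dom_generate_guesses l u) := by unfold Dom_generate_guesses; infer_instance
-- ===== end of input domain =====

-- B memoises the four knowledge predicates once per distinct sum/product key (dict
-- comprehensions read back by lookup) instead of re-evaluating the nested predicate
-- recursion for every pair.

-- ===== PORT A =====
-- the two defaultdicts, built by the nested p,q loop (sums, prods)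
def pvBuildA (l u : Int) :
    PySem.Dict Int (List (Int × Int)) × PySem.Dict Int (List (Int × Int)) :=
  (PySem.List.pyRange l (u + 1) 1).foldl (fun sp p =>
    (PySem.List.pyRange p (u + 1) 1).foldl (fun sp q =>
      (sp.1.modify (p + q) [] (· ++ [(p, q)]),
       sp.2.modify (p * q) [] (· ++ [(p, q)]))) sp)
    (PySem.Dict.empty, PySem.Dict.empty)

-- defaultdict read of a missing key yields [] (the insertion it also performs never changes
-- any value read afterwards), so the predicates are ported as pure reads with default [].
def pvPollyDoesNotKnow (prods : PySem.Dict Int (List (Int × Int))) (n : Int) : Bool :=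
  decide ((prods.getD n []).length > 1)

def pvSamDoesNotKnow (sums prods : PySem.Dict Int (List (Int × Int))) (n : Int) : Bool :=
  decide (PySem.Int.mod n 2 = 1) &&
  decide ((sums.getD n []).length > 1) &&
  (sums.getD n []).all (fun xy => pvPollyDoesNotKnow prods (xy.1 * xy.2))

-- the counting loop of now_polly_knows, with its early 'return False'
def pvNowPollyLoop (sums prods : PySem.Dict Int (List (Int × Int))) :
    List (Int × Int) → Int → Bool
  | [], count => count == 1
  | xy :: rest, count =>
      let count' := if pvSamDoesNotKnow sums prods (xy.1 + xy.2) then count + 1 else count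
      if count' > 1 then false else pvNowPollyLoop sums prods rest count'

def pvNowPollyKnows (sums prods : PySem.Dict Int (List (Int × Int))) (n : Int) : Bool :=
  pvNowPollyLoop sums prods (prods.getD n []) 0

-- the counting loop of now_sam_knows, with its early 'return False'
def pvNowSamLoop (sums prods : PySem.Dict Int (List (Int × Int))) :
    List (Int × Int) → Int → Bool
  | [], count => count == 1
  | xy :: rest, count =>
      let count' := if pvNowPollyKnows sums prods (xy.1 * xy.2) then count + 1 else count
      if count' > 1 then false else pvNowSamLoop sums prods rest count'

def pvNowSamKnows (sums prods : PySem.Dict Int (List (Int × Int))) (n : Int) : Bool :=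
  pvNowSamLoop sums prods (sums.getD n []) 0

def generate_guesses (l : Int) (u : Int) : List (Int × Int) :=
  let sp := pvBuildA l u
  let sums := sp.1
  let prods := sp.2
  (PySem.List.pyRange l (u + 1) 1).flatMap (fun p =>
    ((PySem.List.pyRange p (u + 1) 1).filter (fun q =>
      pvPollyDoesNotKnow prods (p * q) &&
      pvSamDoesNotKnow sums prods (p + q) &&
      pvNowPollyKnows sums prods (p * q) &&
      pvNowSamKnows sums prods (p + q))).map (fun q => (p, q)))

-- ===== PORT B =====
-- plain dicts built with setdefault(...).append(...)
def pvBuildB (l u : Int) :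
    PySem.Dict Int (List (Int × Int)) × PySem.Dict Int (List (Int × Int)) :=
  (PySem.List.pyRange l (u + 1) 1).foldl (fun sp p =>
    (PySem.List.pyRange p (u + 1) 1).foldl (fun sp q =>
      (sp.1.insert (p + q) (sp.1.getD (p + q) [] ++ [(p, q)]),
       sp.2.insert (p * q) (sp.2.getD (p * q) [] ++ [(p, q)]))) sp)
    (PySem.Dict.empty, PySem.Dict.empty)

-- {n: f(n, v) for n, v in d.items()}
def pvMemo (d : PySem.Dict Int (List (Int × Int))) (f : Int → List (Int × Int) → Bool) :
    PySem.Dict Int Bool :=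
  PySem.Dict.ofList (d.items.map (fun nv => (nv.1, f nv.1 nv.2)))

def pvPdk (prods : PySem.Dict Int (List (Int × Int))) : PySem.Dict Int Bool :=
  pvMemo prods (fun _ v => decide (v.length > 1))

def pvSdk (sums : PySem.Dict Int (List (Int × Int))) (pdk : PySem.Dict Int Bool) :
    PySem.Dict Int Bool :=
  pvMemo sums (fun n v =>
    decide (PySem.Int.mod n 2 = 1) && decide (v.length > 1) &&
    v.all (fun xy => pdk.getD (xy.1 * xy.2) false))

def pvNpk (prods : PySem.Dict Int (List (Int × Int))) (sdk : PySem.Dict Int Bool) :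
    PySem.Dict Int Bool :=
  pvMemo prods (fun _ v =>
    (v.map (fun xy => if sdk.getD (xy.1 + xy.2) false then (1 : Int) else 0)).sum == 1)

def pvNsk (sums : PySem.Dict Int (List (Int × Int))) (npk : PySem.Dict Int Bool) :
    PySem.Dict Int Bool :=
  pvMemo sums (fun _ v =>
    (v.map (fun xy => if npk.getD (xy.1 * xy.2) false then (1 : Int) else 0)).sum == 1)

def generate_guesses_alt (l : Int) (u : Int) : List (Int × Int) :=
  let sp := pvBuildB l u
  let sums := sp.1
  let prods := sp.2
  let pdk := pvPdk prods
  let sdk := pvSdk sums pdk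
  let npk := pvNpk prods sdk
  let nsk := pvNsk sums npk
  (PySem.List.pyRange l (u + 1) 1).flatMap (fun p =>
    ((PySem.List.pyRange p (u + 1) 1).filter (fun q =>
      pdk.getD (p * q) false &&
      sdk.getD (p + q) false &&
      npk.getD (p * q) false &&
      nsk.getD (p + q) false)).map (fun q => (p, q)))

-- ===== PRECONDITION & SPEC =====
def Spec_generate_guesses (l : Int) (u : Int) (out : List (Int × Int)) : Prop := out = generate_guesses_alt l u
instance (l : Int) (u : Int) (out : List (Int × Int)) : Decidable (Spec_generate_guesses l u out) := by unfold Spec_generate_guesses; infer_instance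

-- ===== CLAIM (what is proved, stated in full; the proofs are below) =====
def Claim_equal_generate_guesses : Prop := ∀ (l : Int) (u : Int), Dom_generate_guesses l u → Spec_generate_guesses l u (generate_guesses l u)

-- ===== LEMMAS AND PROOFS =====

-- the two builders are the same fold (modify k [] f = insert k (f (getD k [])))
lemma pvBuild_eq (l u : Int) : pvBuildB l u = pvBuildA l u := rfl

-- the flattened list of pairs the nested loops run over
def pvPairList (l u : Int) : List (Int × Int) :=
  (PySem.List.pyRange l (u + 1) 1).flatMap (fun p =>
    (PySem.List.pyRange p (u + 1) 1).map (fun q => (p, q)))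

-- a fold over a pair of dicts splits componentwise
lemma foldl_prod_split (L : List (Int × Int))
    (F G : PySem.Dict Int (List (Int × Int)) → (Int × Int) → PySem.Dict Int (List (Int × Int)))
    (s t : PySem.Dict Int (List (Int × Int))) :
    L.foldl (fun sp pq => (F sp.1 pq, G sp.2 pq)) (s, t) = (L.foldl F s, L.foldl G t) := by
  induction L generalizing s t with
  | nil => rfl
  | cons x xs ih => simp [List.foldl_cons, ih]

lemma pvBuildA_eq_pairs (l u : Int) :
    pvBuildA l u =
      ((pvPairList l u).foldl (fun d pq => d.insert (pq.1 + pq.2) (d.getD (pq.1 + pq.2) [] ++ [pq])) PySem.Dict.empty,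
       (pvPairList l u).foldl (fun d pq => d.insert (pq.1 * pq.2) (d.getD (pq.1 * pq.2) [] ++ [pq])) PySem.Dict.empty) := by
  unfold pvBuildA pvPairList
  rw [← foldl_prod_split, List.foldl_flatMap]
  simp [List.foldl_map, PySem.Dict.modify]

lemma pvBuild_keys_nodup (l u : Int) :
    (pvBuildA l u).1.keys.Nodup ∧ (pvBuildA l u).2.keys.Nodup := by
  rw [pvBuildA_eq_pairs]
  constructor
  · exact PySem.Dict.nodup_keys_foldl_insert_key (pvPairList l u) (fun pq => pq.1 + pq.2)
      (fun d pq => d.getD (pq.1 + pq.2) [] ++ [pq]) PySem.Dict.empty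
      (by simp [PySem.Dict.keys, PySem.Dict.empty])
  · exact PySem.Dict.nodup_keys_foldl_insert_key (pvPairList l u) (fun pq => pq.1 * pq.2)
      (fun d pq => d.getD (pq.1 * pq.2) [] ++ [pq]) PySem.Dict.empty
      (by simp [PySem.Dict.keys, PySem.Dict.empty])

-- the dict comprehension reads back as the function of the stored value
lemma pvMemo_getD (d : PySem.Dict Int (List (Int × Int))) (f : Int → List (Int × Int) → Bool)
    (hd : d.keys.Nodup) (k : Int) :
    (pvMemo d f).getD k false = match d.get? k with | some v => f k v | none => false := by
  have hitems : (pvMemo d f).items = d.items.map (fun nv => (nv.1, f nv.1 nv.2)) := by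
    unfold pvMemo PySem.Dict.ofList PySem.Dict.update
    rw [PySem.Dict.items_foldl_insert_fresh _ Prod.fst Prod.snd _
      (fun a _ => PySem.Dict.contains_empty _) (by simpa [PySem.Dict.keys] using hd)]
    simp [Function.comp_def, PySem.Dict.empty]
  rcases hfind : d.items.find? (fun p => p.1 == k) with _ | nv
  · simp [PySem.Dict.getD, PySem.Dict.get?, hitems, List.find?_map, Function.comp_def, hfind]
  · have hk : nv.1 = k := by
      have := List.find?_some hfind
      simpa using this
    simp [PySem.Dict.getD, PySem.Dict.get?, hitems, List.find?_map, Function.comp_def, hfind, hk]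

lemma pdk_pointwise (prods : PySem.Dict Int (List (Int × Int))) (hp : prods.keys.Nodup) (n : Int) :
    (pvPdk prods).getD n false = pvPollyDoesNotKnow prods n := by
  rw [pvPdk, pvMemo_getD _ _ hp]
  unfold pvPollyDoesNotKnow
  rcases hg : prods.get? n with _ | v
  · simp [PySem.Dict.getD_eq_get?_getD, hg]
  · simp [PySem.Dict.getD_eq_get?_getD, hg]

lemma sdk_pointwise (sums prods : PySem.Dict Int (List (Int × Int)))
    (hs : sums.keys.Nodup) (hp : prods.keys.Nodup) (n : Int) :
    (pvSdk sums (pvPdk prods)).getD n false = pvSamDoesNotKnow sums prods n := by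
  rw [pvSdk, pvMemo_getD _ _ hs]
  simp only [pdk_pointwise prods hp]
  unfold pvSamDoesNotKnow
  rcases hg : sums.get? n with _ | v
  · simp [PySem.Dict.getD_eq_get?_getD, hg]
  · simp [PySem.Dict.getD_eq_get?_getD, hg]

lemma nowPollyLoop_eq (sums prods : PySem.Dict Int (List (Int × Int)))
    (L : List (Int × Int)) (c : Int) (hc : 0 ≤ c) :
    pvNowPollyLoop sums prods L c =
      decide (c + (L.countP (fun xy => pvSamDoesNotKnow sums prods (xy.1 + xy.2)) : Int) = 1) := by
  induction L generalizing c with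
  | nil => simp only [pvNowPollyLoop]; rw [Bool.eq_iff_iff]; simp
  | cons xy rest ih =>
    have hstep : pvNowPollyLoop sums prods (xy :: rest) c =
        if (if pvSamDoesNotKnow sums prods (xy.1 + xy.2) then c + 1 else c) > 1 then false
        else pvNowPollyLoop sums prods rest
          (if pvSamDoesNotKnow sums prods (xy.1 + xy.2) then c + 1 else c) := rfl
    rw [hstep, List.countP_cons]
    by_cases h : pvSamDoesNotKnow sums prods (xy.1 + xy.2) = true
    · simp only [h, if_true]
      by_cases h2 : c + 1 > 1
      · rw [if_pos h2]
        symm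
        simp only [decide_eq_false_iff_not]
        push_cast
        omega
      · rw [if_neg h2, ih _ (by omega)]
        simp only [decide_eq_decide]
        push_cast
        omega
    · simp only [h, Bool.false_eq_true, if_false]
      by_cases h2 : c > 1
      · rw [if_pos h2]
        symm
        simp only [decide_eq_false_iff_not]
        push_cast
        omega
      · rw [if_neg h2, ih _ hc]
        simp only [decide_eq_decide]
        push_cast
        omega

lemma npk_pointwise (sums prods : PySem.Dict Int (List (Int × Int)))
    (hs : sums.keys.Nodup) (hp : prods.keys.Nodup) (n : Int) :
    (pvNpk prods (pvSdk sums (pvPdk prods))).getD n false = pvNowPollyKnows sums prods n := by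
  rw [pvNpk, pvMemo_getD _ _ hp]
  simp only [sdk_pointwise sums prods hs hp]
  unfold pvNowPollyKnows
  rcases hg : prods.get? n with _ | v
  · simp [PySem.Dict.getD_eq_get?_getD, hg, pvNowPollyLoop]
  · simp only [PySem.Dict.getD_eq_get?_getD, hg, Option.getD_some]
    rw [nowPollyLoop_eq sums prods v 0 le_rfl, PySem.List.sum_map_ite_one_zero]
    rw [Bool.eq_iff_iff]
    simp

lemma nowSamLoop_eq (sums prods : PySem.Dict Int (List (Int × Int)))
    (L : List (Int × Int)) (c : Int) (hc : 0 ≤ c) :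
    pvNowSamLoop sums prods L c =
      decide (c + (L.countP (fun xy => pvNowPollyKnows sums prods (xy.1 * xy.2)) : Int) = 1) := by
  induction L generalizing c with
  | nil => simp only [pvNowSamLoop]; rw [Bool.eq_iff_iff]; simp
  | cons xy rest ih =>
    have hstep : pvNowSamLoop sums prods (xy :: rest) c =
        if (if pvNowPollyKnows sums prods (xy.1 * xy.2) then c + 1 else c) > 1 then false
        else pvNowSamLoop sums prods rest
          (if pvNowPollyKnows sums prods (xy.1 * xy.2) then c + 1 else c) := rfl
    rw [hstep, List.countP_cons]
    by_cases h : pvNowPollyKnows sums prods (xy.1 * xy.2) = true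
    · simp only [h, if_true]
      by_cases h2 : c + 1 > 1
      · rw [if_pos h2]
        symm
        simp only [decide_eq_false_iff_not]
        push_cast
        omega
      · rw [if_neg h2, ih _ (by omega)]
        simp only [decide_eq_decide]
        push_cast
        omega
    · simp only [h, Bool.false_eq_true, if_false]
      by_cases h2 : c > 1
      · rw [if_pos h2]
        symm
        simp only [decide_eq_false_iff_not]
        push_cast
        omega
      · rw [if_neg h2, ih _ hc]
        simp only [decide_eq_decide]
        push_cast
        omega

lemma nsk_pointwise (sums prods : PySem.Dict Int (List (Int × Int)))
    (hs : sums.keys.Nodup) (hp : prods.keys.Nodup) (n : Int) :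
    (pvNsk sums (pvNpk prods (pvSdk sums (pvPdk prods)))).getD n false = pvNowSamKnows sums prods n := by
  rw [pvNsk, pvMemo_getD _ _ hs]
  simp only [npk_pointwise sums prods hs hp]
  unfold pvNowSamKnows
  rcases hg : sums.get? n with _ | v
  · simp [PySem.Dict.getD_eq_get?_getD, hg, pvNowSamLoop]
  · simp only [PySem.Dict.getD_eq_get?_getD, hg, Option.getD_some]
    rw [nowSamLoop_eq sums prods v 0 le_rfl, PySem.List.sum_map_ite_one_zero]
    rw [Bool.eq_iff_iff]
    simp

-- ===== VERDICT (by name: the statement is the Claim_ definition above) =====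
theorem generate_guesses_spec : Claim_equal_generate_guesses := by
  intro l u _
  unfold Spec_generate_guesses generate_guesses generate_guesses_alt
  rw [pvBuild_eq]
  dsimp only
  obtain ⟨hs, hp⟩ := pvBuild_keys_nodup l u
  congr 1
  funext p
  congr 1
  apply List.filter_congr
  intro q _
  rw [pdk_pointwise _ hp, sdk_pointwise _ _ hs hp, npk_pointwise _ _ hs hp,
      nsk_pointwise _ _ hs hp]
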